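-- pv_equiv track=rewrite | github.com/shizhenneko/Video-Transformer | src/analyzer/content_analyzer.py | _truncate_to_last_complete_item
-- ===== SOURCE A (Python) =====
-- def _truncate_to_last_complete_item(text: str) -> str | None:
--     """截断到最后一个逗号处, 然后重新闭合括号。用于丢弃被截断的最后一个元素。"""
--     last_comma = text.rfind(",")
--     if last_comma <= 0:
--         return None
--
--     truncated = text[:last_comma]
--
--     # 重新扫描并闭合
--     bracket_stack: list[str] = []
--     in_str = False
--     esc = False
--     for ch in truncated:
--         if esc:
--             esc = False
--             continue
--         if ch == "\\" and in_str:
--             esc = True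
--             continue
--         if ch == '"':
--             in_str = not in_str
--             continue
--         if in_str:
--             continue
--         if ch in ("{", "["):
--             bracket_stack.append(ch)
--         elif ch == "}" and bracket_stack and bracket_stack[-1] == "{":
--             bracket_stack.pop()
--         elif ch == "]" and bracket_stack and bracket_stack[-1] == "[":
--             bracket_stack.pop()
--
--     closing_map = {"[": "]", "{": "}"}
--     suffix = "".join(closing_map[b] for b in reversed(bracket_stack))
--     return truncated + suffix
-- ===== SOURCE B (Python) =====
-- def _outside_strings(s):
--     """Characters of s that lie outside double-quoted string literals
--     (quotes themselves removed; backslash escapes honoured inside strings)."""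
--     out = []
--     i = 0
--     n = len(s)
--     while i < n:
--         ch = s[i]
--         if ch == '"':
--             i += 1
--             while i < n:
--                 if s[i] == "\\":
--                     i += 2
--                 elif s[i] == '"':
--                     i += 1
--                     break
--                 else:
--                     i += 1
--         else:
--             out.append(ch)
--             i += 1
--     return "".join(out)
--
--
-- def _truncate_to_last_complete_item(text: str) -> str | None:
--     last_comma = text.rfind(",")
--     if last_comma <= 0:
--         return None
--     truncated = text[:last_comma]
--     stack = []
--     for ch in _outside_strings(truncated):
--         if ch == "{" or ch == "[":
--             stack.append(ch)
--         elif ch == "}" and stack and stack[-1] == "{":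
--             stack.pop()
--         elif ch == "]" and stack and stack[-1] == "[":
--             stack.pop()
--     return truncated + "".join("}" if b == "{" else "]" for b in reversed(stack))
-- ===== Notes on version B (the rewrite author's own statement) =====
-- stated objective: alternative
-- what changed: Replaced A's single scan with inline in_str/esc flags by a two-phase decomposition: a helper first strips double-quoted string literals (honouring escapes and unterminated strings), then a plain bracket stack scans the stripped text with no string logic.
import Mathlib
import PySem

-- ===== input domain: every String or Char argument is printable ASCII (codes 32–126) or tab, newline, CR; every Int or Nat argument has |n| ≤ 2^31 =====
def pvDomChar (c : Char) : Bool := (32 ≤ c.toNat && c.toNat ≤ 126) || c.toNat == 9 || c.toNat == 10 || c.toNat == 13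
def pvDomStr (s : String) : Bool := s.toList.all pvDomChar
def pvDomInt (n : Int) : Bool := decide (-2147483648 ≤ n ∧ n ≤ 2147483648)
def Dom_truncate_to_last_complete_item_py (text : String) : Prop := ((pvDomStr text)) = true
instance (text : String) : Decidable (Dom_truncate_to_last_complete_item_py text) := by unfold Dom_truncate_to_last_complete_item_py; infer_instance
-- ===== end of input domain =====

-- B replaces A's single scan with inline in_str/esc flags by a two-phase decomposition:
-- first strip the string literals, then run a plain bracket stack; same return values (objective: alternative).

-- ===== PORT A =====
-- one step of A's for-loop; state = (bracket_stack with top at head, in_str, esc)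
def pyAStep : (List Char × Bool × Bool) → Char → (List Char × Bool × Bool)
  | (stack, in_str, esc), ch =>
    if esc then (stack, in_str, false)
    else if ch = '\\' ∧ in_str = true then (stack, in_str, true)
    else if ch = '"' then (stack, !in_str, esc)
    else if in_str = true then (stack, in_str, esc)
    else if ch = '{' ∨ ch = '[' then (ch :: stack, in_str, esc)
    else if ch = '}' ∧ stack.head? = some '{' then (stack.tail, in_str, esc)
    else if ch = ']' ∧ stack.head? = some '[' then (stack.tail, in_str, esc)
    else (stack, in_str, esc)

def truncate_to_last_complete_item_py (text : String) : Option String :=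
  let last_comma := PySem.Str.rfind text ","
  if last_comma ≤ 0 then none
  else
    let truncated := PySem.Chars.slice text.toList none (some last_comma)
    let st := truncated.foldl pyAStep ([], false, false)
    some (String.ofList (truncated ++ st.1.map (fun b => if b = '[' then ']' else '}')))

-- ===== PORT B =====
-- B's _outside_strings while-loop: outer position = stripStrings, inner literal-skipping loop = skipString
mutual
def stripStrings : List Char → List Char
  | [] => []
  | c :: rest => if c = '"' then skipString rest else c :: stripStrings rest

def skipString : List Char → List Char
  | [] => []
  | c :: rest =>
    if c = '\\' then
      match rest with
      | [] => []
      | _ :: r => skipString r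
    else if c = '"' then stripStrings rest
    else skipString rest
end

-- one step of B's bracket-stack loop (no string logic)
def bStep (stack : List Char) (ch : Char) : List Char :=
  if ch = '{' ∨ ch = '[' then ch :: stack
  else if ch = '}' ∧ stack.head? = some '{' then stack.tail
  else if ch = ']' ∧ stack.head? = some '[' then stack.tail
  else stack

def truncate_to_last_complete_item_py_alt (text : String) : Option String :=
  let last_comma := PySem.Str.rfind text ","
  if last_comma ≤ 0 then none
  else
    let truncated := PySem.Chars.slice text.toList none (some last_comma)
    let stack := (stripStrings truncated).foldl bStep []
    some (String.ofList (truncated ++ stack.map (fun b => if b = '{' then '}' else ']')))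

-- ===== PRECONDITION & SPEC =====
def Spec_truncate_to_last_complete_item_py (text : String) (out : Option String) : Prop := out = truncate_to_last_complete_item_py_alt text
instance (text : String) (out : Option String) : Decidable (Spec_truncate_to_last_complete_item_py text out) := by unfold Spec_truncate_to_last_complete_item_py; infer_instance

-- ===== CLAIM (what is proved, stated in full; the proofs are below) =====
def Claim_equal_truncate_to_last_complete_item_py : Prop := ∀ (text : String), Dom_truncate_to_last_complete_item_py text → Spec_truncate_to_last_complete_item_py text (truncate_to_last_complete_item_py text)

-- ===== LEMMAS AND PROOFS =====

lemma pyAStep_out (stack : List Char) (c : Char) (h : c ≠ '"') :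
    pyAStep (stack, false, false) c = (bStep stack c, false, false) := by
  simp only [pyAStep, bStep, h]
  split_ifs <;> simp_all

lemma bStep_inv (stack : List Char) (c : Char)
    (h : ∀ b ∈ stack, b = '{' ∨ b = '[') :
    ∀ b ∈ bStep stack c, b = '{' ∨ b = '[' := by
  intro b hb
  unfold bStep at hb
  by_cases h1 : c = '{' ∨ c = '['
  · rw [if_pos h1] at hb
    rcases List.mem_cons.mp hb with rfl | hb'
    · exact h1
    · exact h b hb'
  · rw [if_neg h1] at hb
    by_cases h2 : c = '}' ∧ stack.head? = some '{'
    · rw [if_pos h2] at hb; exact h b (List.mem_of_mem_tail hb)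
    · rw [if_neg h2] at hb
      by_cases h3 : c = ']' ∧ stack.head? = some '['
      · rw [if_pos h3] at hb; exact h b (List.mem_of_mem_tail hb)
      · rw [if_neg h3] at hb; exact h b hb

lemma fold_inv : ∀ (l stack : List Char),
    (∀ b ∈ stack, b = '{' ∨ b = '[') →
    ∀ b ∈ l.foldl bStep stack, b = '{' ∨ b = '[' := by
  intro l
  induction l with
  | nil => intro stack h; simpa using h
  | cons c rest ih =>
    intro stack h
    simpa [List.foldl] using ih (bStep stack c) (bStep_inv stack c h)

lemma map_close_eq (s : List Char) (h : ∀ b ∈ s, b = '{' ∨ b = '[') :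
    s.map (fun b => if b = '[' then ']' else '}') =
    s.map (fun b => if b = '{' then '}' else ']') := by
  apply List.map_congr_left
  intro b hb
  rcases h b hb with rfl | rfl <;> simp

lemma stripFold : ∀ (n : Nat) (l : List Char), l.length ≤ n → ∀ stack : List Char,
    (l.foldl pyAStep (stack, false, false)).1 = (stripStrings l).foldl bStep stack ∧
    (l.foldl pyAStep (stack, true, false)).1 = (skipString l).foldl bStep stack := by
  intro n
  induction n with
  | zero =>
    intro l hl stack
    have : l = [] := List.eq_nil_of_length_eq_zero (Nat.le_zero.mp hl)
    subst this
    rw [stripStrings.eq_def, skipString.eq_def]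
    simp
  | succ n ih =>
    intro l hl stack
    match l with
    | [] => rw [stripStrings.eq_def, skipString.eq_def]; simp
    | c :: rest =>
      have hrest : rest.length ≤ n := by simpa using Nat.succ_le_succ_iff.mp hl
      constructor
      · -- outside-string state
        by_cases hq : c = '"'
        · subst hq
          have hs : stripStrings ('"' :: rest) = skipString rest := by
            rw [stripStrings.eq_def]; simp
          have hstep : pyAStep (stack, false, false) '"' = (stack, true, false) := by
            simp [pyAStep]
          simp only [List.foldl]
          rw [hstep, hs]
          exact (ih rest hrest stack).2
        · have hs : stripStrings (c :: rest) = c :: stripStrings rest := by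
            rw [stripStrings.eq_def]; simp [hq]
          simp only [List.foldl]
          rw [pyAStep_out stack c hq, hs]
          simpa [List.foldl] using (ih rest hrest (bStep stack c)).1
      · -- inside-string state
        by_cases hbs : c = '\\'
        · subst hbs
          have hstep : pyAStep (stack, true, false) '\\' = (stack, true, true) := by
            simp [pyAStep]
          match rest with
          | [] =>
            have hs : skipString ['\\'] = [] := by rw [skipString.eq_def]; simp
            simp only [List.foldl]
            rw [hstep, hs]
            simp [List.foldl]
          | c' :: r =>
            have hs : skipString ('\\' :: c' :: r) = skipString r := by
              rw [skipString.eq_def]; simp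
            have hesc : pyAStep (stack, true, true) c' = (stack, true, false) := by
              simp [pyAStep]
            have hr : r.length ≤ n := by simp at hrest; omega
            simp only [List.foldl]
            rw [hstep, hesc, hs]
            exact (ih r hr stack).2
        · by_cases hq : c = '"'
          · subst hq
            have hs : skipString ('"' :: rest) = stripStrings rest := by
              rw [skipString.eq_def]; simp
            have hstep : pyAStep (stack, true, false) '"' = (stack, false, false) := by
              simp [pyAStep]
            simp only [List.foldl]
            rw [hstep, hs]
            exact (ih rest hrest stack).1
          · have hs : skipString (c :: rest) = skipString rest := by
              rw [skipString.eq_def]; simp [hbs, hq]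
            have hstep : pyAStep (stack, true, false) c = (stack, true, false) := by
              simp [pyAStep, hbs, hq]
            simp only [List.foldl]
            rw [hstep, hs]
            exact (ih rest hrest stack).2

-- ===== VERDICT (by name: the statement is the Claim_ definition above) =====
theorem truncate_to_last_complete_item_py_spec : Claim_equal_truncate_to_last_complete_item_py := by
  unfold Claim_equal_truncate_to_last_complete_item_py
  intro text _
  unfold Spec_truncate_to_last_complete_item_py
  unfold truncate_to_last_complete_item_py truncate_to_last_complete_item_py_alt
  simp only []
  split_ifs with h
  · rfl
  · set truncated := PySem.Chars.slice text.toList none (some (PySem.Str.rfind text ",")) with htr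
    have hfold := (stripFold truncated.length truncated le_rfl []).1
    have hinv := fold_inv (stripStrings truncated) [] (by simp)
    rw [hfold, map_close_eq _ hinv]
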